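-- pv_equiv track=rewrite | github.com/blhwong/algos_py | algo_exp/airport_connections/main.py | dfs
-- ===== SOURCE A (Python) =====
-- def dfs(airport, graph, startingAirport, visited, final_count):
--     if len(visited) == final_count:
--         return True
--     if airport in visited:
--         return False
--     visited.add(airport)
--     for a in graph[airport]:
--         if a != startingAirport:
--             done = dfs(a, graph, startingAirport, visited, final_count)
--             if done:
--                 return True
--
--     return False
-- ===== SOURCE B (Python) =====
-- def dfs(airport, graph, startingAirport, visited, final_count):
--     stack = [airport]
--     while stack:
--         node = stack.pop()
--         if len(visited) == final_count:
--             return True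
--         if node in visited:
--             continue
--         visited.add(node)
--         for a in reversed(graph[node]):
--             if a != startingAirport:
--                 stack.append(a)
--     return False
-- ===== Notes on version B (the rewrite author's own statement) =====
-- stated objective: alternative
-- what changed: A's recursive DFS (call-entry checks, early return through the call stack) is replaced by an iterative DFS with an explicit list-as-stack: pop a node, do the final_count/visited checks at pop time, push the filtered neighbours in reverse so the traversal order and the mutation of `visited` are identical.
-- outside the precondition, e.g. on dfs('a', {'a': ['b'], 'b': ['x']}, 'z', set(), 2): A returns True, B returns True
import Mathlib
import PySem

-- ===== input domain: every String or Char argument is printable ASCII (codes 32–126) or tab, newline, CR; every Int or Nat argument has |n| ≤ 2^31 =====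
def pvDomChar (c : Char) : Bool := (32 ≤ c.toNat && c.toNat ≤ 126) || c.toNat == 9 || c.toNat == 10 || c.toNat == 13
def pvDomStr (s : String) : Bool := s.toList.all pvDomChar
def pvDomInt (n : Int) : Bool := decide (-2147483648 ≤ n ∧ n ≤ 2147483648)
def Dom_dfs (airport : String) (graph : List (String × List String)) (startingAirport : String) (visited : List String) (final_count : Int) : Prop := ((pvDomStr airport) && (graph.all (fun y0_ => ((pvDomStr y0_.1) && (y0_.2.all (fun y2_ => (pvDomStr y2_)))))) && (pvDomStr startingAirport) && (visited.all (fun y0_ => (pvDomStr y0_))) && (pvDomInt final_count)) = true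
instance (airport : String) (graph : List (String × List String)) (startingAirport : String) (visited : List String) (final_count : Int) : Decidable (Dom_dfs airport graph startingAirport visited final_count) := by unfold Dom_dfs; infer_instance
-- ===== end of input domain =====

-- B replaces A's recursion by an iterative explicit-stack DFS (pop-time checks, neighbours pushed in
-- reverse) — same algorithmic cost, different decomposition. Both A and B mutate the passed-in
-- `visited` set identically; the equivalence proved here is about the RETURN value only.

-- ===== PORT A =====
-- Fuel making the recursion total: 1 + the total length of all adjacency lists bounds the number of
-- call entries (each newly visited node is a distinct dict key, so at most Σ|graph[k]| child calls
-- are ever made, plus the initial one). The fuel is threaded through the loop (each call entry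
-- consumes one unit and returns the remainder); the 0-fallback is never reached from `dfs`.
def pvFuelA (graph : List (String × List String)) : Nat :=
  1 + (graph.map (fun p => p.2.length)).sum

mutual
  -- `def dfs(airport, …)` body; result `none` = the Python raises KeyError (graph[airport] missing).
  def dfsRec (graph : List (String × List String)) (start : String) (count : Int)
      (fuel : Nat) (airport : String) (visited : List String) :
      Option (Bool × List String × Nat) :=
    match fuel with
    | 0 => some (false, visited, 0)
    | Nat.succ f =>
      if (visited.length : Int) = count then some (true, visited, f)       -- len(visited) == final_count
      else if PySem.Set.contains visited airport then some (false, visited, f)  -- airport in visited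
      else
        match (PySem.Dict.mk graph).get? airport with                      -- graph[airport]
        | none => none                                                     -- KeyError
        | some ns => dfsFor graph start count f ns (PySem.Set.add visited airport)
  termination_by (fuel, 0)
  decreasing_by exact Prod.Lex.left _ _ (Nat.lt_succ_self f)
  -- `for a in graph[airport]: …` with the early `return True`
  def dfsFor (graph : List (String × List String)) (start : String) (count : Int)
      (fuel : Nat) (ns : List String) (visited : List String) :
      Option (Bool × List String × Nat) :=
    match ns with
    | [] => some (false, visited, fuel)
    | n :: rest =>
      if n = start then dfsFor graph start count fuel rest visited         -- a != startingAirport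
      else
        match dfsRec graph start count fuel n visited with
        | none => none
        | some (true, v', f') => some (true, v', f')                       -- if done: return True
        | some (false, v', f') => dfsFor graph start count (min f' fuel) rest v'
          -- (`min f' fuel` = f' whenever the fuel is threaded honestly (dfsRec_fuel_le below), and
          --  makes the lexicographic termination measure manifestly decrease)
  termination_by (fuel, ns.length + 1)
  decreasing_by
    · exact Prod.Lex.right fuel (by simp only [List.length_cons]; omega)
    · exact Prod.Lex.right fuel (by simp only [List.length_cons]; omega)
    · rcases Nat.lt_or_ge (min f' fuel) fuel with h | h
      · exact Prod.Lex.left _ _ h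
      · have heq : min f' fuel = fuel := Nat.le_antisymm (Nat.min_le_right _ _) h
        rw [heq]; exact Prod.Lex.right fuel (by simp only [List.length_cons]; omega)
end

def dfs (airport : String) (graph : List (String × List String)) (startingAirport : String) (visited : List String) (final_count : Int) : Bool :=
  match dfsRec graph startingAirport final_count (pvFuelA graph) airport visited with
  | some (b, _, _) => b
  | none => false   -- the Python raises KeyError here; excluded by Pre_dfs

-- ===== PORT B =====
def pvFuelB (graph : List (String × List String)) : Nat :=
  1 + (graph.map (fun p => p.2.length)).sum

-- `while stack:` — one fuel unit per pop (same count as A's call entries); `none` = KeyError.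
def stackLoop (graph : List (String × List String)) (start : String) (count : Int)
    (fuel : Nat) (stack : List String) (visited : List String) : Option Bool :=
  match fuel, stack with
  | _, [] => some false                                                    -- loop ends: return False
  | 0, _ :: _ => some false                                                -- fuel fallback (never reached from dfs_alt)
  | Nat.succ f, node :: rest =>
    if (visited.length : Int) = count then some true
    else if PySem.Set.contains visited node then stackLoop graph start count f rest visited
    else
      match (PySem.Dict.mk graph).get? node with
      | none => none                                                       -- KeyError
      | some ns =>
        stackLoop graph start count f
          (ns.reverse.foldl (fun st a => if a ≠ start then a :: st else st) rest)
          (PySem.Set.add visited node)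

def dfs_alt (airport : String) (graph : List (String × List String)) (startingAirport : String) (visited : List String) (final_count : Int) : Bool :=
  match stackLoop graph startingAirport final_count (pvFuelB graph) [airport] visited with
  | some b => b
  | none => false

-- ===== PRECONDITION & SPEC =====
-- `pvReach` is the set of nodes the traversal can ever look up in the graph dict: the closure of
-- {airport} under "expand a node that has a graph entry and is not initially visited, into its
-- neighbours other than startingAirport" (graph.length expansion rounds reach the fixpoint, since
-- every expandable node is a distinct dict key).
def pvNext (graph : List (String × List String)) (start : String) (visited : List String)
    (s : PySem.Set String) : PySem.Set String :=
  (PySem.Dict.mk graph).items.foldl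
    (fun acc p =>
      if PySem.Set.contains s p.1 && !(PySem.Set.contains visited p.1)
      then PySem.Set.update acc (p.2.filter (fun a => a ≠ start)) else acc) s

def pvReach (graph : List (String × List String)) (start : String) (visited : List String)
    (airport : String) : PySem.Set String :=
  Nat.iterate (pvNext graph start visited) graph.length (PySem.Set.add PySem.Set.empty airport)

-- Pre_dfs excludes exactly the inputs where Python's `graph[...]` raises KeyError — a node with no
-- graph entry reached by the traversal (both A and B raise there) — stated as the closed-form
-- condition "every node reachable from airport has a graph entry" (unless A short-circuits at
-- once); the only normally-returning inputs it also excludes are the rare ones where hitting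
-- final_count stops the traversal just before a reachable dangling node.
def Pre_dfs (airport : String) (graph : List (String × List String)) (startingAirport : String) (visited : List String) (final_count : Int) : Prop :=
  ((visited.length : Int) = final_count) ∨ (airport ∈ visited) ∨
    (∀ n ∈ pvReach graph startingAirport visited airport,
      ((PySem.Dict.mk graph).get? n).isSome = true)
instance (airport : String) (graph : List (String × List String)) (startingAirport : String) (visited : List String) (final_count : Int) : Decidable (Pre_dfs airport graph startingAirport visited final_count) := by unfold Pre_dfs; infer_instance

def pvWitness_dfs : String × (List (String × List String)) × String × List String × Int :=
  ("a", [("a", ["b"]), ("b", [])], "a", [], 2)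

def Spec_dfs (airport : String) (graph : List (String × List String)) (startingAirport : String) (visited : List String) (final_count : Int) (out : Bool) : Prop := out = dfs_alt airport graph startingAirport visited final_count
instance (airport : String) (graph : List (String × List String)) (startingAirport : String) (visited : List String) (final_count : Int) (out : Bool) : Decidable (Spec_dfs airport graph startingAirport visited final_count out) := by unfold Spec_dfs; infer_instance

-- ===== CLAIM (what is proved, stated in full; the proofs are below) =====
def Claim_equal_dfs : Prop := ∀ (airport : String) (graph : List (String × List String)) (startingAirport : String) (visited : List String) (final_count : Int), Dom_dfs airport graph startingAirport visited final_count → Pre_dfs airport graph startingAirport visited final_count → Spec_dfs airport graph startingAirport visited final_count (dfs airport graph startingAirport visited final_count)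

-- ===== LEMMAS AND PROOFS =====

-- B-side continuation: what the stack loop does after A's recursion on one node finishes.
def pvCont (graph : List (String × List String)) (start : String) (count : Int)
    (r : Option (Bool × List String × Nat)) (s : List String) : Option Bool :=
  match r with
  | none => none
  | some (true, _, _) => some true
  | some (false, v', f') => stackLoop graph start count f' s v'

-- Pushing the reversed, filtered neighbour list onto the stack = prepending the filtered list.
theorem push_eq (start : String) (ns rest : List String) :
    ns.reverse.foldl (fun st a => if a ≠ start then a :: st else st) rest
      = ns.filter (fun a => decide (a ≠ start)) ++ rest := by
  induction ns with
  | nil => rfl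
  | cons n ns ih =>
      simp only [List.reverse_cons, List.foldl_append, List.foldl, ih, List.filter_cons]
      by_cases h : n = start <;> simp [h]

-- Joint invariant, by functional induction on A's mutual recursion: popping `airport` from the
-- stack behaves like one recursive call of A followed by the continuation on the rest of the
-- stack, and the threaded fuel never increases.
theorem dfs_main (graph : List (String × List String)) (start : String) (count : Int) :
    ∀ fuel airport visited,
      (∀ s, stackLoop graph start count fuel (airport :: s) visited
          = pvCont graph start count (dfsRec graph start count fuel airport visited) s)
      ∧ (∀ b v' f', dfsRec graph start count fuel airport visited = some (b, v', f') → f' ≤ fuel) := by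
  apply dfsRec.induct graph start count
    (motive2 := fun fuel ns visited =>
      (∀ s, stackLoop graph start count fuel (ns.filter (fun a => decide (a ≠ start)) ++ s) visited
          = pvCont graph start count (dfsFor graph start count fuel ns visited) s)
      ∧ (∀ b v' f', dfsFor graph start count fuel ns visited = some (b, v', f') → f' ≤ fuel))
  · intro a v
    refine ⟨fun s => ?_, fun b v' f' h => ?_⟩
    · cases s <;> simp [stackLoop, dfsRec, pvCont]
    · simp [dfsRec] at h; omega
  · intro a v f hcount
    refine ⟨fun s => ?_, fun b v' f' h => ?_⟩
    · simp [stackLoop, dfsRec, pvCont, hcount]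
    · simp [dfsRec, hcount] at h; omega
  · intro a v f hcount hmem
    have hmem' : a ∈ v := by simpa using hmem
    refine ⟨fun s => ?_, fun b v' f' h => ?_⟩
    · simp [stackLoop, dfsRec, pvCont, hcount, hmem']
    · simp [dfsRec, hcount, hmem'] at h; omega
  · intro a v f hcount hmem hnone
    have hmem' : a ∉ v := by simpa using hmem
    refine ⟨fun s => ?_, fun b v' f' h => ?_⟩
    · simp [stackLoop, dfsRec, pvCont, hcount, hmem', hnone]
    · simp [dfsRec, hcount, hmem', hnone] at h
  · intro a v f hcount hmem ns hsome IH
    refine ⟨fun s => ?_, fun b v' f' h => ?_⟩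
    · have h1 := IH.1 s
      simp only [stackLoop, dfsRec, hcount, hmem, hsome]
      simp only [hcount, hmem, if_false, Bool.false_eq_true] at *
      rw [push_eq]
      exact h1
    · simp only [dfsRec, hcount, hmem, hsome] at h
      have := IH.2 b v' f'
      exact Nat.le_trans (this (by simpa using h)) (Nat.le_succ f)
  · intro fuel v
    refine ⟨fun s => ?_, fun b v' f' h => ?_⟩
    · simp [dfsFor, pvCont]
    · simp [dfsFor] at h; omega
  · intro fuel v rest IH
    refine ⟨fun s => ?_, fun b v' f' h => ?_⟩
    · have h1 := IH.1 s
      simpa [dfsFor, List.filter_cons] using h1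
    · apply IH.2 b v' f'
      simpa [dfsFor] using h
  · intro fuel v n rest hne hrec IH
    have hfil : (n :: rest).filter (fun a => decide (a ≠ start))
        = n :: rest.filter (fun a => decide (a ≠ start)) := by simp [hne]
    refine ⟨fun s => ?_, fun b v' f' h => ?_⟩
    · have h1 := IH.1 (rest.filter (fun a => decide (a ≠ start)) ++ s)
      rw [hfil, List.cons_append, h1, hrec]
      simp [pvCont, dfsFor, hne, hrec]
    · simp only [dfsFor] at h
      rw [if_neg hne, hrec] at h
      exact absurd h (by simp)
  · intro fuel v n rest hne v1 f1 hrec IH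
    have hfil : (n :: rest).filter (fun a => decide (a ≠ start))
        = n :: rest.filter (fun a => decide (a ≠ start)) := by simp [hne]
    refine ⟨fun s => ?_, fun b v' f' h => ?_⟩
    · have h1 := IH.1 (rest.filter (fun a => decide (a ≠ start)) ++ s)
      rw [hfil, List.cons_append, h1, hrec]
      simp only [pvCont]
      simp only [dfsFor]
      rw [if_neg hne, hrec]
    · have hle := IH.2 true v1 f1 hrec
      simp only [dfsFor] at h
      rw [if_neg hne, hrec] at h
      simp at h
      omega
  · intro fuel v n rest hne v1 f1 hrec IH1 IH2
    have hle : f1 ≤ fuel := IH1.2 false v1 f1 hrec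
    have hmin : min f1 fuel = f1 := Nat.min_eq_left hle
    have hfil : (n :: rest).filter (fun a => decide (a ≠ start))
        = n :: rest.filter (fun a => decide (a ≠ start)) := by simp [hne]
    refine ⟨fun s => ?_, fun b v' f' h => ?_⟩
    · have h1 := IH1.1 (rest.filter (fun a => decide (a ≠ start)) ++ s)
      have h2 := IH2.1 s
      rw [hmin] at h2
      rw [hfil, List.cons_append, h1, hrec]
      simp only [pvCont]
      rw [h2]
      simp only [dfsFor]
      rw [if_neg hne, hrec]
      simp only [hmin]
      cases hd : dfsFor graph start count f1 rest v1 with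
      | none => simp [pvCont]
      | some t =>
          rcases t with ⟨b2, v2, f2⟩
          cases b2 <;> simp [pvCont]
    · simp only [dfsFor] at h
      rw [if_neg hne, hrec] at h
      simp only [hmin] at h
      have := IH2.2 b v' f'
      rw [hmin] at this
      exact Nat.le_trans (this h) hle

-- ===== VERDICT (by name: the statement is the Claim_ definition above) =====
theorem dfs_spec : Claim_equal_dfs := by
  intro airport graph startingAirport visited final_count _ _
  unfold Spec_dfs
  have h := (dfs_main graph startingAirport final_count (pvFuelA graph) airport visited).1 []
  have hfuel : pvFuelB graph = pvFuelA graph := rfl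
  cases hr : dfsRec graph startingAirport final_count (pvFuelA graph) airport visited with
  | none => simp [dfs, dfs_alt, hfuel, h, hr, pvCont]
  | some t =>
      rcases t with ⟨b, v', f'⟩
      cases b <;> simp [dfs, dfs_alt, hfuel, h, hr, pvCont, stackLoop]
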